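-- pv_equiv track=rewrite | github.com/Kuldr/Advent-of-Code | 2021/17/solution.py | simulateProbe
-- ===== SOURCE A (Python) =====
-- def simulateProbe(probeVelX, probeVelY, xlow, xhigh, ylow, yhigh):
-- 	probePosX = 0
-- 	probePosY = 0
-- 	maxY = 0
-- 	while True:
-- 		# Update the positions
-- 		probePosX += probeVelX
-- 		probePosY += probeVelY
-- 		if probePosY > maxY:
-- 			maxY = probePosY
--
-- 		# Change velocity
-- 		probeVelY -= 1
-- 		if probeVelX > 0:
-- 			probeVelX -= 1
--
-- 		# Check the position is out of bounds
-- 		if probeVelY < 0 and probePosY < ylow: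
-- 			return False, maxY
-- 		if probeVelX == 0 and (probePosX < xlow or probePosX > xhigh):
-- 			return False, maxY
--
-- 		# Check in bounds
-- 		if probePosX >= xlow and probePosX <= xhigh and probePosY >= ylow and probePosY <= yhigh:
-- 			return True, maxY
-- ===== SOURCE B (Python) =====
-- def simulateProbe(probeVelX, probeVelY, xlow, xhigh, ylow, yhigh):
--     # Closed-form kinematics: instead of updating positions/velocities/maxY
--     # step by step, only a step counter n is kept; position and peak at step n
--     # come from Gauss-sum formulas.
--     def tri(m):
--         return m * (m - 1) // 2
--
--     vx0, vy0 = probeVelX, probeVelY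
--     n = 1
--     while True:
--         posY = n * vy0 - tri(n)
--         if vx0 <= 0:
--             posX = n * vx0
--         elif vx0 <= n:
--             posX = vx0 * (vx0 + 1) // 2
--         else:
--             posX = n * vx0 - tri(n)
--         m = min(n, vy0) if vy0 > 0 else 0
--         maxY = m * vy0 - tri(m)
--         if n > vy0 and posY < ylow:
--             return False, maxY
--         if 0 <= vx0 <= n and (posX < xlow or posX > xhigh):
--             return False, maxY
--         if xlow <= posX <= xhigh and ylow <= posY <= yhigh:
--             return True, maxY
--         n += 1
-- ===== Notes on version B (the rewrite author's own statement) =====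
-- stated objective: alternative
-- what changed: B drops A's incrementally updated position/velocity/maxY state and instead keeps only a step counter n, computing the probe's x/y position, the drag stall point and the running peak at step n directly from closed-form Gauss-sum formulas each iteration, with the stop conditions re-expressed in terms of n.
import Mathlib
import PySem

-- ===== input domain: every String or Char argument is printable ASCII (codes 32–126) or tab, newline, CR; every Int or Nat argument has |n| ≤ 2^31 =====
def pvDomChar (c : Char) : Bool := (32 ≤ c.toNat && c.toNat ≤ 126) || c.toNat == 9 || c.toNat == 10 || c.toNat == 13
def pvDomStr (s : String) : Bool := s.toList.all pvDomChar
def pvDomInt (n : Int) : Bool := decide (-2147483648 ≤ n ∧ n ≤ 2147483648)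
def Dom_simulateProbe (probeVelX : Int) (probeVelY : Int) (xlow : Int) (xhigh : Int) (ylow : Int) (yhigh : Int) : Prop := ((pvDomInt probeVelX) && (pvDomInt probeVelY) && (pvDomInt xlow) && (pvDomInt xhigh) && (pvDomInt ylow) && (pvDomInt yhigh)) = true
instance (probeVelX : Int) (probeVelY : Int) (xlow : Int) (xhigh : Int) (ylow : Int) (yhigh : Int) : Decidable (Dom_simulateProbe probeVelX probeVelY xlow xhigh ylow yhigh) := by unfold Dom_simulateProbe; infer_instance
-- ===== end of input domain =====

-- B replaces A's incremental position/velocity/maxY state by a step counter with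
-- closed-form (Gauss-sum) kinematics evaluated each step (objective: alternative).
-- Both loops terminate on every input; the ports carry a fuel counter (2^63) solely
-- as a totality guard, consumed in lockstep, far beyond what any |arg| ≤ 2^31 input uses.

def pvFuel : Nat := 2 ^ 63

-- ===== PORT A =====
def pvLoopA (xlow xhigh ylow yhigh : Int) (posX posY velX velY maxY : Int) : Nat → Bool × Int
  | 0 => (false, 0)
  | fuel + 1 =>
    let posX' := posX + velX
    let posY' := posY + velY
    let maxY' := if posY' > maxY then posY' else maxY
    let velY' := velY - 1
    let velX' := if velX > 0 then velX - 1 else velX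
    if velY' < 0 ∧ posY' < ylow then (false, maxY')
    else if velX' = 0 ∧ (posX' < xlow ∨ posX' > xhigh) then (false, maxY')
    else if xlow ≤ posX' ∧ posX' ≤ xhigh ∧ ylow ≤ posY' ∧ posY' ≤ yhigh then (true, maxY')
    else pvLoopA xlow xhigh ylow yhigh posX' posY' velX' velY' maxY' fuel

def simulateProbe (probeVelX : Int) (probeVelY : Int) (xlow : Int) (xhigh : Int) (ylow : Int) (yhigh : Int) : Bool × Int :=
  pvLoopA xlow xhigh ylow yhigh 0 0 probeVelX probeVelY 0 pvFuel

-- ===== PORT B =====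
def pvTriB (m : Int) : Int := PySem.Int.floordiv (m * (m - 1)) 2

def pvLoopB (vx0 vy0 xlow xhigh ylow yhigh : Int) (n : Int) : Nat → Bool × Int
  | 0 => (false, 0)
  | fuel + 1 =>
    let posY := n * vy0 - pvTriB n
    let posX := if vx0 ≤ 0 then n * vx0
                else if vx0 ≤ n then PySem.Int.floordiv (vx0 * (vx0 + 1)) 2
                else n * vx0 - pvTriB n
    let m := if vy0 > 0 then min n vy0 else 0
    let maxY := m * vy0 - pvTriB m
    if n > vy0 ∧ posY < ylow then (false, maxY)
    else if 0 ≤ vx0 ∧ vx0 ≤ n ∧ (posX < xlow ∨ posX > xhigh) then (false, maxY)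
    else if xlow ≤ posX ∧ posX ≤ xhigh ∧ ylow ≤ posY ∧ posY ≤ yhigh then (true, maxY)
    else pvLoopB vx0 vy0 xlow xhigh ylow yhigh (n + 1) fuel

def simulateProbe_alt (probeVelX : Int) (probeVelY : Int) (xlow : Int) (xhigh : Int) (ylow : Int) (yhigh : Int) : Bool × Int :=
  pvLoopB probeVelX probeVelY xlow xhigh ylow yhigh 1 pvFuel

-- ===== PRECONDITION & SPEC =====
def Spec_simulateProbe (probeVelX : Int) (probeVelY : Int) (xlow : Int) (xhigh : Int) (ylow : Int) (yhigh : Int) (out : Bool × Int) : Prop := out = simulateProbe_alt probeVelX probeVelY xlow xhigh ylow yhigh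
instance (probeVelX : Int) (probeVelY : Int) (xlow : Int) (xhigh : Int) (ylow : Int) (yhigh : Int) (out : Bool × Int) : Decidable (Spec_simulateProbe probeVelX probeVelY xlow xhigh ylow yhigh out) := by unfold Spec_simulateProbe; infer_instance

-- ===== CLAIM (what is proved, stated in full; the proofs are below) =====
def Claim_equal_simulateProbe : Prop := ∀ (probeVelX : Int) (probeVelY : Int) (xlow : Int) (xhigh : Int) (ylow : Int) (yhigh : Int), Dom_simulateProbe probeVelX probeVelY xlow xhigh ylow yhigh → Spec_simulateProbe probeVelX probeVelY xlow xhigh ylow yhigh (simulateProbe probeVelX probeVelY xlow xhigh ylow yhigh)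

-- ===== LEMMAS AND PROOFS =====

-- closed forms for A's loop state after n steps
def pvPX (vx0 n : Int) : Int :=
  if vx0 ≤ 0 then n * vx0
  else if vx0 ≤ n then PySem.Int.floordiv (vx0 * (vx0 + 1)) 2
  else n * vx0 - pvTriB n

def pvVX (vx0 n : Int) : Int := if vx0 ≤ 0 then vx0 else max (vx0 - n) 0

def pvPY (vy0 n : Int) : Int := n * vy0 - pvTriB n

def pvMY (vy0 n : Int) : Int :=
  (if vy0 > 0 then min n vy0 else 0) * vy0 - pvTriB (if vy0 > 0 then min n vy0 else 0)

lemma pvTri_eq (m : Int) : 2 * pvTriB m = m * (m - 1) := by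
  obtain ⟨k, hk⟩ : Even (m * (m - 1)) := by
    have h := Int.even_mul_succ_self (m - 1)
    simpa [mul_comm] using h
  have : pvTriB m = k := by
    unfold pvTriB
    rw [PySem.Int.floordiv_eq_iff_of_pos (by norm_num)]
    constructor <;> omega
  omega

lemma pvStall_eq (v : Int) : 2 * PySem.Int.floordiv (v * (v + 1)) 2 = v * (v + 1) := by
  obtain ⟨k, hk⟩ : Even (v * (v + 1)) := Int.even_mul_succ_self v
  have : PySem.Int.floordiv (v * (v + 1)) 2 = k := by
    rw [PySem.Int.floordiv_eq_iff_of_pos (by norm_num)]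
    constructor <;> omega
  omega

lemma pvTri_succ (n : Int) : pvTriB (n + 1) = pvTriB n + n := by
  have h1 := pvTri_eq (n + 1)
  have h2 := pvTri_eq n
  ring_nf at h1 h2 ⊢
  linarith

lemma pvTri_nonneg (m : Int) : 0 ≤ pvTriB m := by
  have h := pvTri_eq m
  rcases (show 1 ≤ m ∨ m < 1 by omega) with hm | hm
  · nlinarith
  · nlinarith

lemma pvPY_succ (vy0 n : Int) : pvPY vy0 (n + 1) = pvPY vy0 n + (vy0 - n) := by
  simp only [pvPY, pvTri_succ]; ring

lemma pvVX_succ (vx0 n : Int) :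
    (if pvVX vx0 n > 0 then pvVX vx0 n - 1 else pvVX vx0 n) = pvVX vx0 (n + 1) := by
  simp only [pvVX]
  split_ifs <;> omega

lemma pvVX_zero_iff (vx0 n : Int) (h : 0 < n) : pvVX vx0 n = 0 ↔ 0 ≤ vx0 ∧ vx0 ≤ n := by
  simp only [pvVX]
  split_ifs <;> omega

lemma pvPX_succ (vx0 n : Int) : pvPX vx0 (n + 1) = pvPX vx0 n + pvVX vx0 n := by
  have hs := pvStall_eq vx0
  have h1 := pvTri_eq (n + 1)
  have h2 := pvTri_eq n
  simp only [pvPX, pvVX]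
  split_ifs with c1 c2 c3 c4
  · ring
  · have hmax : max (vx0 - n) 0 = 0 := by omega
    rw [hmax]; ring
  · -- n + 1 ≥ vx0 > n : n = vx0 - 1, stall is reached this step
    have hn : n = vx0 - 1 := by omega
    have hmax : max (vx0 - n) 0 = 1 := by omega
    subst hn
    rw [hmax]
    ring_nf at hs h2 ⊢
    linarith
  · omega
  · -- still dragging
    have hmax : max (vx0 - n) 0 = vx0 - n := by omega
    rw [hmax, pvTri_succ]
    ring

lemma pvMY_succ (vy0 n : Int) (h : 0 ≤ n) :
    pvMY vy0 (n + 1) = (if pvPY vy0 (n + 1) > pvMY vy0 n then pvPY vy0 (n + 1) else pvMY vy0 n) := by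
  simp only [pvMY, pvPY]
  rcases (show vy0 ≤ 0 ∨ 0 < vy0 by omega) with hv | hv
  · -- never above the start: peak stays 0
    have hnot : ¬ ((n + 1) * vy0 - pvTriB (n + 1) > 0 * vy0 - pvTriB 0) := by
      have ht := pvTri_nonneg (n + 1)
      have h0 : pvTriB 0 = 0 := by decide
      have : (n + 1) * vy0 ≤ 0 := mul_nonpos_of_nonneg_of_nonpos (by omega) hv
      omega
    simp only [if_neg (by omega : ¬ vy0 > 0)]
    rw [if_neg hnot]
  · simp only [if_pos hv]
    rcases (show n + 1 ≤ vy0 ∨ vy0 < n + 1 by omega) with hc | hc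
    · -- ascending: the new position is the new peak
      have hm1 : min (n + 1) vy0 = n + 1 := by omega
      have hm2 : min n vy0 = n := by omega
      rw [hm1, hm2, if_pos]
      have := pvTri_succ n
      nlinarith
    · -- past the apex: peak frozen at step vy0
      have hm1 : min (n + 1) vy0 = vy0 := by omega
      have hm2 : min n vy0 = vy0 := by omega
      rw [hm1, hm2, if_neg]
      have h1 := pvTri_eq (n + 1)
      have h2 := pvTri_eq vy0
      have hd : (vy0 - (n + 1)) * (vy0 - (n + 1) + 1) ≥ 0 := by
        have hp := mul_nonneg (show (0:Int) ≤ -(vy0 - (n + 1)) by omega)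
          (show (0:Int) ≤ -(vy0 - (n + 1) + 1) by omega)
        nlinarith [hp]
      nlinarith

lemma pvLock (vx0 vy0 xlow xhigh ylow yhigh : Int) :
    ∀ (fuel : Nat) (n : Int), 0 ≤ n →
      pvLoopA xlow xhigh ylow yhigh (pvPX vx0 n) (pvPY vy0 n) (pvVX vx0 n) (vy0 - n) (pvMY vy0 n) fuel
        = pvLoopB vx0 vy0 xlow xhigh ylow yhigh (n + 1) fuel := by
  intro fuel
  induction fuel with
  | zero => intro n _; rfl
  | succ f ih =>
    intro n hn
    have hPX : pvPX vx0 n + pvVX vx0 n = pvPX vx0 (n + 1) := (pvPX_succ vx0 n).symm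
    have hPY : pvPY vy0 n + (vy0 - n) = pvPY vy0 (n + 1) := (pvPY_succ vy0 n).symm
    have hVX := pvVX_succ vx0 n
    have hMY := (pvMY_succ vy0 n hn).symm
    show (let posX' := pvPX vx0 n + pvVX vx0 n
          let posY' := pvPY vy0 n + (vy0 - n)
          let maxY' := if posY' > pvMY vy0 n then posY' else pvMY vy0 n
          let velY' := (vy0 - n) - 1
          let velX' := if pvVX vx0 n > 0 then pvVX vx0 n - 1 else pvVX vx0 n
          if velY' < 0 ∧ posY' < ylow then (false, maxY')
          else if velX' = 0 ∧ (posX' < xlow ∨ posX' > xhigh) then (false, maxY')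
          else if xlow ≤ posX' ∧ posX' ≤ xhigh ∧ ylow ≤ posY' ∧ posY' ≤ yhigh then (true, maxY')
          else pvLoopA xlow xhigh ylow yhigh posX' posY' velX' velY' maxY' f) = _
    simp only [hPX, hPY, hVX, hMY]
    show (if (vy0 - n - 1 < 0) ∧ pvPY vy0 (n + 1) < ylow then (false, pvMY vy0 (n + 1))
          else if pvVX vx0 (n + 1) = 0 ∧ (pvPX vx0 (n + 1) < xlow ∨ pvPX vx0 (n + 1) > xhigh) then (false, pvMY vy0 (n + 1))
          else if xlow ≤ pvPX vx0 (n + 1) ∧ pvPX vx0 (n + 1) ≤ xhigh ∧ ylow ≤ pvPY vy0 (n + 1) ∧ pvPY vy0 (n + 1) ≤ yhigh then (true, pvMY vy0 (n + 1))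
          else pvLoopA xlow xhigh ylow yhigh (pvPX vx0 (n + 1)) (pvPY vy0 (n + 1)) (pvVX vx0 (n + 1)) (vy0 - n - 1) (pvMY vy0 (n + 1)) f) = _
    show _ = (let posY := (n + 1) * vy0 - pvTriB (n + 1)
              let posX := if vx0 ≤ 0 then (n + 1) * vx0
                          else if vx0 ≤ n + 1 then PySem.Int.floordiv (vx0 * (vx0 + 1)) 2
                          else (n + 1) * vx0 - pvTriB (n + 1)
              let m := if vy0 > 0 then min (n + 1) vy0 else 0
              let maxY := m * vy0 - pvTriB m
              if (n + 1) > vy0 ∧ posY < ylow then (false, maxY)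
              else if 0 ≤ vx0 ∧ vx0 ≤ n + 1 ∧ (posX < xlow ∨ posX > xhigh) then (false, maxY)
              else if xlow ≤ posX ∧ posX ≤ xhigh ∧ ylow ≤ posY ∧ posY ≤ yhigh then (true, maxY)
              else pvLoopB vx0 vy0 xlow xhigh ylow yhigh ((n + 1) + 1) f)
    have hA : vy0 - n - 1 = vy0 - (n + 1) := by ring
    rw [hA]
    show (if _ then _ else _) = (if _ then _ else _)
    have e1 : (vy0 - (n + 1) < 0 ∧ pvPY vy0 (n + 1) < ylow) ↔ ((n + 1) > vy0 ∧ pvPY vy0 (n + 1) < ylow) := by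
      constructor <;> (rintro ⟨a, b⟩; exact ⟨by omega, b⟩)
    have e2 : (pvVX vx0 (n + 1) = 0 ∧ (pvPX vx0 (n + 1) < xlow ∨ pvPX vx0 (n + 1) > xhigh)) ↔
              (0 ≤ vx0 ∧ vx0 ≤ n + 1 ∧ (pvPX vx0 (n + 1) < xlow ∨ pvPX vx0 (n + 1) > xhigh)) := by
      rw [pvVX_zero_iff vx0 (n + 1) (by omega)]
      tauto
    simp only [pvPY, pvPX, pvMY] at e1 e2 ⊢
    rw [if_congr e1 rfl rfl]
    rw [if_congr (Iff.rfl) rfl (if_congr e2 rfl rfl)]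
    congr 1
    congr 1
    congr 1
    have := ih (n + 1) (by omega)
    simp only [pvPY, pvPX, pvMY] at this
    exact this

lemma pvInit (vx0 vy0 : Int) :
    pvPX vx0 0 = 0 ∧ pvPY vy0 0 = 0 ∧ pvVX vx0 0 = vx0 ∧ pvMY vy0 0 = 0 := by
  have h0 : pvTriB 0 = 0 := by decide
  refine ⟨?_, ?_, ?_, ?_⟩
  · simp only [pvPX]
    split_ifs with c1
    · ring
    · rw [h0]; ring
  · simp only [pvPY]; rw [h0]; ring
  · simp only [pvVX]
    split_ifs <;> omega
  · simp only [pvMY]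
    split_ifs with hv
    · have hmin : min (0:Int) vy0 = 0 := by omega
      rw [hmin, h0]; ring
    · rw [h0]; ring

-- ===== VERDICT (by name: the statement is the Claim_ definition above) =====
theorem simulateProbe_spec : Claim_equal_simulateProbe := by
  intro vx0 vy0 xlow xhigh ylow yhigh _
  unfold Spec_simulateProbe simulateProbe simulateProbe_alt
  obtain ⟨h1, h2, h3, h4⟩ := pvInit vx0 vy0
  have := pvLock vx0 vy0 xlow xhigh ylow yhigh pvFuel 0 le_rfl
  rw [h1, h2, h3, h4] at this
  simpa using this
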